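-- pv_equiv track=rewrite | github.com/wuzengding/TRANSAID | TISTTS_Pair_Analyzer2.py | _get_true_positions
-- ===== SOURCE A (Python) =====
-- def _get_true_positions(true_labels):
--     """从true_labels中提取真实的TIS和TTS位置"""
--     tis_pos = None
--     tts_pos = None
--
--     # 寻找连续的3个TIS标签(0)
--     for i in range(len(true_labels)-2):
--         if (true_labels[i] == 0 and
--             true_labels[i+1] == 0 and
--             true_labels[i+2] == 0):
--             tis_pos = i
--             break
--
--     # 寻找连续的3个TTS标签(1)
--     for i in range(len(true_labels)-2):
--         if (true_labels[i] == 1 and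
--             true_labels[i+1] == 1 and
--             true_labels[i+2] == 1):
--             tts_pos = i
--             break
--
--     return tis_pos, tts_pos
-- ===== SOURCE B (Python) =====
-- def _get_true_positions(true_labels):
--     tis_pos = None
--     tts_pos = None
--     for i in range(len(true_labels) - 2):
--         if tis_pos is None and true_labels[i] == true_labels[i+1] == true_labels[i+2] == 0:
--             tis_pos = i
--         if tts_pos is None and true_labels[i] == true_labels[i+1] == true_labels[i+2] == 1:
--             tts_pos = i
--         if tis_pos is not None and tts_pos is not None:
--             break
--     return tis_pos, tts_pos
-- ===== Notes on version B (the rewrite author's own statement) =====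
-- stated objective: alternative
-- what changed: Replaces A's two separate full scans (one per label) by a single pass that maintains both first-run positions at once and breaks as soon as both are found.
import Mathlib
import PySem

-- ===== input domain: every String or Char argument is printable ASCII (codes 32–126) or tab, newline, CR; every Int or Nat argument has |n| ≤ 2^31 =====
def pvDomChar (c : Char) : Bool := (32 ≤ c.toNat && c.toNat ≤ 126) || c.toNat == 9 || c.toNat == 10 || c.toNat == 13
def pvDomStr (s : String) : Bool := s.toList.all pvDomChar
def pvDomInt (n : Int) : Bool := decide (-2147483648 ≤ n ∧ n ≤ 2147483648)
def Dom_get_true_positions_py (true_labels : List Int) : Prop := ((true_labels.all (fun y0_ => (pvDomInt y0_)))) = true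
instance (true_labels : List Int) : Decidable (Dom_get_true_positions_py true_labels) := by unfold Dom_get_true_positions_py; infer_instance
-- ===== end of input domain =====

-- B replaces A's two separate scans by one pass maintaining both positions with an early break (alternative decomposition, same cost).

-- ===== PORT A =====
-- A's loop 'for i in range(len-2): if l[i]==v and l[i+1]==v and l[i+2]==v: pos=i; break':
-- scan the list window by window, i the current index.
def pvFindRun3 (v : Int) : List Int → Int → Option Int
  | a :: b :: c :: rest, i =>
    if a = v ∧ b = v ∧ c = v then some i else pvFindRun3 v (b :: c :: rest) (i + 1)
  | _, _ => none

def get_true_positions_py (true_labels : List Int) : Option Int × Option Int :=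
  (pvFindRun3 0 true_labels 0, pvFindRun3 1 true_labels 0)

-- ===== PORT B =====
-- B's single loop: carry (tis, tts), set each when still none and the window matches, break once both are set.
def pvScanBoth : List Int → Int → Option Int → Option Int → Option Int × Option Int
  | a :: b :: c :: rest, i, tis, tts =>
    let tis' := if tis = none ∧ a = 0 ∧ b = 0 ∧ c = 0 then some i else tis
    let tts' := if tts = none ∧ a = 1 ∧ b = 1 ∧ c = 1 then some i else tts
    if tis' ≠ none ∧ tts' ≠ none then (tis', tts')
    else pvScanBoth (b :: c :: rest) (i + 1) tis' tts'
  | _, _, tis, tts => (tis, tts)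

def get_true_positions_py_alt (true_labels : List Int) : Option Int × Option Int :=
  pvScanBoth true_labels 0 none none

-- ===== PRECONDITION & SPEC =====
def Spec_get_true_positions_py (true_labels : List Int) (out : Option Int × Option Int) : Prop := out = get_true_positions_py_alt true_labels
instance (true_labels : List Int) (out : Option Int × Option Int) : Decidable (Spec_get_true_positions_py true_labels out) := by unfold Spec_get_true_positions_py; infer_instance

-- ===== CLAIM (what is proved, stated in full; the proofs are below) =====
def Claim_equal_get_true_positions_py : Prop := ∀ (true_labels : List Int), Dom_get_true_positions_py true_labels → Spec_get_true_positions_py true_labels (get_true_positions_py true_labels)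

-- ===== LEMMAS AND PROOFS =====

-- A preset accumulator is never overwritten; the scan fills a `none` slot with the first matching window.
theorem pvScanBoth_eq (l : List Int) (i : Int) (tis tts : Option Int) :
    pvScanBoth l i tis tts =
      ((tis.orElse fun _ => pvFindRun3 0 l i), (tts.orElse fun _ => pvFindRun3 1 l i)) := by
  induction l generalizing i tis tts with
  | nil => simp [pvScanBoth, pvFindRun3]
  | cons a rest ih =>
    match rest with
    | [] => simp [pvScanBoth, pvFindRun3]
    | [b] => simp [pvScanBoth, pvFindRun3]
    | b :: c :: rest' =>
      simp only [pvScanBoth, pvFindRun3]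
      cases tis <;> cases tts <;> split_ifs <;> simp_all [Option.orElse]

-- ===== VERDICT (by name: the statement is the Claim_ definition above) =====
theorem get_true_positions_py_spec : Claim_equal_get_true_positions_py := by
  intro l _
  unfold Spec_get_true_positions_py get_true_positions_py get_true_positions_py_alt
  rw [pvScanBoth_eq]
  simp [Option.orElse]
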